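-- pv_equiv track=rewrite | github.com/surgical-AI/SUMER-VID | cholec_video_processing/video_slicing_with_multiprocessing.py | get_phase_stamps
-- ===== SOURCE A (Python) =====
-- from collections import defaultdict
--
-- def get_phase_stamps(timestamps):
--     phase_stamp_dict = defaultdict(list)
--     prev_phase = None
--     prev_timestamp = None
--     for timestamp in timestamps:
--         if prev_phase is None:
--             start = timestamp[0]
--             prev_phase = timestamp[1]
--             prev_timestamp = timestamp[0]
--             continue
--
--         if prev_phase != timestamp[1]:
--             stop = prev_timestamp
--             phase_stamp_dict[prev_phase].append((start, stop))
--             prev_phase = timestamp[1]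
--             start = timestamp[0]
--         prev_timestamp = timestamp[0]
--
--     phase_stamp_dict[prev_phase].append((start, prev_timestamp))
--
--     return phase_stamp_dict
-- ===== SOURCE B (Python) =====
-- from collections import defaultdict
--
-- def get_phase_stamps(timestamps):
--     n = len(timestamps)
--     breaks = [i for i in range(1, n) if timestamps[i][1] != timestamps[i - 1][1]]
--     edges = [0] + breaks + [n]
--     phase_stamp_dict = defaultdict(list)
--     for s, e in zip(edges, edges[1:]):
--         phase_stamp_dict[timestamps[s][1]].append(
--             (timestamps[s][0], timestamps[e - 1][0]))
--     return phase_stamp_dict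
-- ===== Notes on version B (the rewrite author's own statement) =====
-- stated objective: alternative
-- what changed: Replaces A's single-pass prev_phase/start/stop state machine with staged index arithmetic: first compute the list of break positions where the phase changes (comparing adjacent indices), then iterate over adjacent edge pairs and emit (first,last) timestamps of each slice.
import Mathlib
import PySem

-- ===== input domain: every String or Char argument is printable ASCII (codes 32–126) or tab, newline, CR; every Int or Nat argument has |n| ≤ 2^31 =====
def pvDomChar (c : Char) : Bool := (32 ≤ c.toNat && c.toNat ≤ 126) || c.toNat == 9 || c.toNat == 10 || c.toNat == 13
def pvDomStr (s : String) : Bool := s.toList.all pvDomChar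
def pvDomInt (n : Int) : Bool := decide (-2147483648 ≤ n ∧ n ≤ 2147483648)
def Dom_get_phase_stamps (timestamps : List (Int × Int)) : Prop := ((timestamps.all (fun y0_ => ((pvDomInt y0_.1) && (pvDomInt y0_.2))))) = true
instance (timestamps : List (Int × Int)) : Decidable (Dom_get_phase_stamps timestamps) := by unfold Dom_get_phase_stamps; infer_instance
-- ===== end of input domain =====

-- B replaces A's single-pass prev_phase/start/stop state machine by staged index
-- arithmetic: compute the break positions where the phase changes, then emit
-- (first, last) timestamps for each slice between adjacent edges. Same cost, different decomposition.

-- shared helper: defaultdict(list)[k].append(v) on an insertion-ordered association list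
def dAppend (d : List (Int × List (Int × Int))) (k : Int) (v : Int × Int) :
    List (Int × List (Int × Int)) :=
  match d with
  | [] => [(k, [v])]
  | (k', vs) :: rest =>
    if k' = k then (k', vs ++ [v]) :: rest else (k', vs) :: dAppend rest k v

-- ===== PORT A =====
-- A's loop state: (dict, prev_phase (None initially), prev_timestamp, start);
-- prev_timestamp/start are unbound before the first iteration, modelled by dummy 0s that
-- the code never reads while prev_phase is none.
def get_phase_stamps (timestamps : List (Int × Int)) : List (Int × List (Int × Int)) :=
  let s := timestamps.foldl
    (fun (st : List (Int × List (Int × Int)) × Option Int × Int × Int) tm =>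
      match st with
      | (d, none, _, _) => (d, some tm.2, tm.1, tm.1)
      | (d, some pp, pts, start) =>
        if pp ≠ tm.2 then (dAppend d pp (start, pts), some tm.2, tm.1, tm.1)
        else (d, some pp, tm.1, start))
    ([], none, 0, 0)
  match s with
  | (_, none, _, _) => []   -- empty input: Python raises UnboundLocalError (outside Pre_)
  | (d, some pp, pts, start) => dAppend d pp (start, pts)

-- ===== PORT B =====
-- timestamps[i] for the in-range indices B uses (on nonempty input the default is never read)
def nthP (ts : List (Int × Int)) (i : Int) : Int × Int :=
  (PySem.List.pyGet? ts i).getD (0, 0)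

def get_phase_stamps_alt (timestamps : List (Int × Int)) : List (Int × List (Int × Int)) :=
  let n : Int := timestamps.length
  let breaks := (PySem.List.pyRange 1 n 1).filter
      (fun i => (nthP timestamps i).2 != (nthP timestamps (i - 1)).2)
  let edges := 0 :: (breaks ++ [n])
  (edges.zip edges.tail).foldl
    (fun d se => dAppend d (nthP timestamps se.1).2
        ((nthP timestamps se.1).1, (nthP timestamps (se.2 - 1)).1)) []

-- ===== PRECONDITION & SPEC =====
-- Pre_ excludes only the empty list, on which A raises UnboundLocalError ('start' is never
-- assigned) and B raises IndexError.
def Pre_get_phase_stamps (timestamps : List (Int × Int)) : Prop := timestamps ≠ []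
instance (timestamps : List (Int × Int)) : Decidable (Pre_get_phase_stamps timestamps) := by
  unfold Pre_get_phase_stamps; infer_instance

def pvWitness_get_phase_stamps : (List (Int × Int)) := [(0, 1), (1, 1), (2, 2), (3, 1)]

def Spec_get_phase_stamps (timestamps : List (Int × Int)) (out : List (Int × List (Int × Int))) : Prop := out = get_phase_stamps_alt timestamps
instance (timestamps : List (Int × Int)) (out : List (Int × List (Int × Int))) : Decidable (Spec_get_phase_stamps timestamps out) := by unfold Spec_get_phase_stamps; infer_instance

-- ===== CLAIM (what is proved, stated in full; the proofs are below) =====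
def Claim_equal_get_phase_stamps : Prop := ∀ (timestamps : List (Int × Int)), Dom_get_phase_stamps timestamps → Pre_get_phase_stamps timestamps → Spec_get_phase_stamps timestamps (get_phase_stamps timestamps)

-- ===== LEMMAS AND PROOFS =====

-- ---- common intermediate form: fold of (first,last) over consecutive same-phase runs ----

def groupRuns : List (Int × Int) → List (Int × List (Int × Int))
  | [] => []
  | t :: rest =>
    (t.2, t :: rest.takeWhile (fun x => x.2 == t.2)) ::
      groupRuns (rest.dropWhile (fun x => x.2 == t.2))
termination_by l => l.length
decreasing_by
  simpa using Nat.lt_succ_of_le (List.length_dropWhile_le _ _)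

def stepB (d : List (Int × List (Int × Int))) (pg : Int × List (Int × Int)) :
    List (Int × List (Int × Int)) :=
  dAppend d pg.1 ((pg.2.headD (0, 0)).1, (pg.2.getLastD (0, 0)).1)

def gbFold (ts : List (Int × Int)) (d0 : List (Int × List (Int × Int))) :
    List (Int × List (Int × Int)) :=
  (groupRuns ts).foldl stepB d0

-- ---- A side (state machine = runs fold) ----

def stepA (st : List (Int × List (Int × Int)) × Option Int × Int × Int) (tm : Int × Int) :
    List (Int × List (Int × Int)) × Option Int × Int × Int :=
  match st with
  | (d, none, _, _) => (d, some tm.2, tm.1, tm.1)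
  | (d, some pp, pts, start) =>
    if pp ≠ tm.2 then (dAppend d pp (start, pts), some tm.2, tm.1, tm.1)
    else (d, some pp, tm.1, start)

def aAux (d : List (Int × List (Int × Int))) (p start pts : Int) :
    List (Int × Int) → List (Int × List (Int × Int))
  | [] => dAppend d p (start, pts)
  | tm :: rest =>
    if p ≠ tm.2 then aAux (dAppend d p (start, pts)) tm.2 tm.1 tm.1 rest
    else aAux d p start tm.1 rest

def lastTs (pts : Int) : List (Int × Int) → Int
  | [] => pts
  | t :: l => lastTs t.1 l

theorem lastTs_cons (pts : Int) (t : Int × Int) (l : List (Int × Int)) :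
    lastTs pts (t :: l) = lastTs t.1 l := rfl

theorem getLastD1 (l : List (Int × Int)) : ∀ (t : Int × Int), (l.getLastD t).1 = lastTs t.1 l := by
  induction l with
  | nil => intro t; simp [lastTs]
  | cons a l ih => intro t; rw [List.getLastD_cons, lastTs_cons]; exact ih a

theorem getLastD_fst (t : Int × Int) (l : List (Int × Int)) :
    ((t :: l).getLastD (0, 0)).1 = lastTs t.1 l := by
  rw [List.getLastD_cons]; exact getLastD1 l t

theorem aAux_eq (ts : List (Int × Int)) :
    ∀ d p start pts,
      (match ts.foldl stepA (d, some p, pts, start) with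
       | (_, none, _, _) => []
       | (d', some pp, pts', start') => dAppend d' pp (start', pts')) =
      aAux d p start pts ts := by
  induction ts with
  | nil => intro d p start pts; simp [aAux]
  | cons tm rest ih =>
    intro d p start pts
    simp only [List.foldl_cons, stepA, aAux]
    by_cases h : p = tm.2
    · simp [h, ih]
    · simp [h, ih]

theorem aAux_eq_groups (ts : List (Int × Int)) :
    ∀ d p start pts,
      aAux d p start pts ts =
        (groupRuns (ts.dropWhile (fun x => x.2 == p))).foldl stepB
          (dAppend d p (start, lastTs pts (ts.takeWhile (fun x => x.2 == p)))) := by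
  induction ts with
  | nil => intro d p start pts; simp [aAux, groupRuns, lastTs]
  | cons tm rest ih =>
    intro d p start pts
    by_cases h : p = tm.2
    · have h1 : aAux d p start pts (tm :: rest) = aAux d p start tm.1 rest := by
        simp [aAux, h]
      rw [h1, ih d p start tm.1]
      have hb : (tm.2 == p) = true := by simp [h]
      simp [hb, lastTs]
    · have hb : (tm.2 == p) = false := by simp [Ne.symm h]
      simp only [aAux, if_pos h, List.takeWhile_cons, List.dropWhile_cons, hb,
        Bool.false_eq_true, if_false, lastTs]
      rw [ih]
      rw [groupRuns]
      simp only [List.foldl_cons, stepB, List.headD_cons, getLastD_fst]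

theorem A_eq_gb (tm : Int × Int) (rest : List (Int × Int)) :
    get_phase_stamps (tm :: rest) = gbFold (tm :: rest) [] := by
  unfold get_phase_stamps
  simp only [List.foldl_cons]
  rw [show (List.foldl
      (fun st tm => match st with
        | (d, none, _, _) => (d, some tm.2, tm.1, tm.1)
        | (d, some pp, pts, start) =>
          if pp ≠ tm.2 then (dAppend d pp (start, pts), some tm.2, tm.1, tm.1)
          else (d, some pp, tm.1, start)) : _ → _ → _) = List.foldl stepA from rfl]
  rw [aAux_eq, aAux_eq_groups]
  rw [gbFold, groupRuns]
  simp only [List.foldl_cons, stepB, List.headD_cons, getLastD_fst]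

-- ---- B side (index arithmetic = runs fold) ----

def nthN (ts : List (Int × Int)) (i : Nat) : Int × Int := ts.getD i (0, 0)

-- Nat-index formulation of B
def breaksN (ts : List (Int × Int)) : List Nat :=
  ((List.range (ts.length - 1)).filter
      (fun k => (nthN ts (k + 1)).2 != (nthN ts k).2)).map (· + 1)

def stepN (ts : List (Int × Int)) (d : List (Int × List (Int × Int))) (se : Nat × Nat) :
    List (Int × List (Int × Int)) :=
  dAppend d (nthN ts se.1).2 ((nthN ts se.1).1, (nthN ts (se.2 - 1)).1)

def edgesN (ts : List (Int × Int)) : List Nat := 0 :: (breaksN ts ++ [ts.length])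

def bN (ts : List (Int × Int)) (d0 : List (Int × List (Int × Int))) :
    List (Int × List (Int × Int)) :=
  ((edgesN ts).zip (edgesN ts).tail).foldl (stepN ts) d0


-- ---- nthN indexing lemmas ----

theorem nthN_append_left (l l' : List (Int × Int)) (j : Nat) (h : j < l.length) :
    nthN (l ++ l') j = nthN l j := by
  simp [nthN, List.getD_eq_getElem?_getD, List.getElem?_append_left h]

theorem nthN_append_right (l l' : List (Int × Int)) (j : Nat) :
    nthN (l ++ l') (l.length + j) = nthN l' j := by
  simp [nthN, List.getD_eq_getElem?_getD,
    List.getElem?_append_right (by omega : l.length ≤ l.length + j)]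

theorem nthN_last (l : List (Int × Int)) :
    nthN l (l.length - 1) = l.getLastD (0, 0) := by
  rw [nthN, List.getD_eq_getElem?_getD, List.getLastD_eq_getLast?, List.getLast?_eq_getElem?]

theorem nthN_zero_cons (t : Int × Int) (r : List (Int × Int)) : nthN (t :: r) 0 = t := rfl

theorem run_phase (t : Int × Int) (r : List (Int × Int)) (j : Nat)
    (hj : j < (t :: r.takeWhile (fun x => x.2 == t.2)).length) :
    (nthN (t :: r.takeWhile (fun x => x.2 == t.2)) j).2 = t.2 := by
  have hmem : nthN (t :: r.takeWhile (fun x => x.2 == t.2)) j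
      ∈ (t :: r.takeWhile (fun x => x.2 == t.2)) := by
    rw [nthN, List.getD_eq_getElem?_getD, List.getElem?_eq_getElem hj]
    exact List.getElem_mem hj
  rcases List.mem_cons.mp hmem with h | h
  · rw [h]
  · have hp := List.mem_takeWhile_imp h
    exact eq_of_beq hp

-- phase of ts[j] stays t.2 throughout the first run of t :: r
theorem ts_phase_run (t : Int × Int) (r : List (Int × Int)) (j : Nat)
    (hj : j < (t :: r.takeWhile (fun x => x.2 == t.2)).length) :
    (nthN (t :: r) j).2 = t.2 := by
  have hsplit : t :: r = (t :: r.takeWhile (fun x => x.2 == t.2)) ++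
      r.dropWhile (fun x => x.2 == t.2) := by
    simp
  rw [hsplit, nthN_append_left _ _ _ hj]
  exact run_phase t r j hj

-- ---- breaks decomposition ----

theorem breaks_core_run_nil (t : Int × Int) (r : List (Int × Int)) :
    ((List.range ((t :: r.takeWhile (fun x => x.2 == t.2)).length - 1)).filter
      (fun j => (nthN (t :: r) (j + 1)).2 != (nthN (t :: r) j).2)) = [] := by
  rw [List.filter_eq_nil_iff]
  intro j hj
  have hj' : j < (t :: r.takeWhile (fun x => x.2 == t.2)).length - 1 := List.mem_range.mp hj
  have h1 := ts_phase_run t r j (by omega)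
  have h2 := ts_phase_run t r (j + 1) (by omega)
  simp [h1, h2]

theorem breaksN_run_nil (t : Int × Int) (r : List (Int × Int))
    (h : r.dropWhile (fun x => x.2 == t.2) = []) :
    breaksN (t :: r) = [] := by
  have hr : r.takeWhile (fun x => x.2 == t.2) = r := by
    have := List.takeWhile_append_dropWhile (p := fun x => x.2 == t.2) (l := r)
    rw [h, List.append_nil] at this; exact this
  unfold breaksN
  have := breaks_core_run_nil t r
  rw [hr] at this
  rw [this, List.map_nil]

theorem breaksN_run_cons (t : Int × Int) (r : List (Int × Int))
    (h : r.dropWhile (fun x => x.2 == t.2) ≠ []) :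
    breaksN (t :: r) =
      ((r.takeWhile (fun x => x.2 == t.2)).length + 1) ::
        (breaksN (r.dropWhile (fun x => x.2 == t.2))).map
          (· + ((r.takeWhile (fun x => x.2 == t.2)).length + 1)) := by
  set tw := r.takeWhile (fun x => x.2 == t.2) with htw
  set dw := r.dropWhile (fun x => x.2 == t.2) with hdw
  set k := tw.length + 1 with hk
  have hsplit : t :: r = (t :: tw) ++ dw := by simp [htw, hdw]
  have hklen : (t :: tw).length = k := by simp [hk]
  have hdwpos : 1 ≤ dw.length := List.length_pos_iff.mpr h
  have hlen : (t :: r).length = k + dw.length := by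
    rw [hsplit, List.length_append, hklen]
  -- split the index range at k
  have hrange : List.range ((t :: r).length - 1) =
      List.range k ++ (List.range (dw.length - 1)).map (k + ·) := by
    rw [show (t :: r).length - 1 = k + (dw.length - 1) by omega, List.range_add]
  -- the q predicate
  have hq : ∀ j, j + 1 < k → ((nthN (t :: r) (j + 1)).2 != (nthN (t :: r) j).2) = false := by
    intro j hj
    have h1 := ts_phase_run t r j (by rw [hklen]; omega)
    have h2 := ts_phase_run t r (j + 1) (by rw [hklen]; omega)
    simp [h1, h2]
  have hshift : ∀ j, nthN (t :: r) (k + j) = nthN dw j := by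
    intro j
    rw [hsplit, ← hklen, nthN_append_right]
  have hbreak : ((nthN (t :: r) (k - 1 + 1)).2 != (nthN (t :: r) (k - 1)).2) = true := by
    have h1 : (nthN (t :: r) (k - 1)).2 = t.2 := ts_phase_run t r (k - 1) (by rw [hklen]; omega)
    have h2 : nthN (t :: r) (k - 1 + 1) = nthN dw 0 := by
      rw [show k - 1 + 1 = k + 0 by omega]; exact hshift 0
    have h3 : ¬ ((nthN dw 0).2 == t.2) = true := by
      obtain ⟨d0, dr, hdd⟩ : ∃ d0 dr, dw = d0 :: dr := by
        cases hx : dw with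
        | nil => exact absurd hx h
        | cons d0 dr => exact ⟨d0, dr, rfl⟩
      have hhead : ¬ ((dw.head h).2 == t.2) = true := by
        have := List.head_dropWhile_not (p := fun x => x.2 == t.2) (l := r) (by rw [← hdw]; exact h)
        simpa [← hdw] using this
      have : dw.head h = d0 := by simp [hdd]
      rw [this] at hhead
      simpa [hdd, nthN] using hhead
    rw [h2, h1]
    simpa using fun hcontra => h3 (by simp [hcontra])
  -- filter over the first k indices leaves exactly [k-1]
  have hfilter1 : (List.range k).filter
      (fun j => (nthN (t :: r) (j + 1)).2 != (nthN (t :: r) j).2) = [k - 1] := by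
    rw [show k = (k - 1) + 1 by omega, List.range_succ, List.filter_append]
    have hnil : (List.range (k - 1)).filter
        (fun j => (nthN (t :: r) (j + 1)).2 != (nthN (t :: r) j).2) = [] := by
      rw [List.filter_eq_nil_iff]
      intro j hj
      have hj' : j < k - 1 := List.mem_range.mp hj
      simp [hq j (by omega)]
    rw [hnil, List.nil_append, List.filter_cons, if_pos (by simpa using hbreak), List.filter_nil]
    simp
  -- filter over the shifted indices = shifted filter over dw
  have hfilter2 : ((List.range (dw.length - 1)).map (k + ·)).filter
      (fun j => (nthN (t :: r) (j + 1)).2 != (nthN (t :: r) j).2) =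
      ((List.range (dw.length - 1)).filter
        (fun j => (nthN dw (j + 1)).2 != (nthN dw j).2)).map (k + ·) := by
    rw [List.filter_map]
    congr 1
    apply List.filter_congr
    intro j _
    show ((nthN (t :: r) (k + j + 1)).2 != (nthN (t :: r) (k + j)).2) = _
    rw [show k + j + 1 = k + (j + 1) by omega, hshift, hshift]
  unfold breaksN
  rw [hrange, List.filter_append, hfilter1, hfilter2]
  simp only [List.map_map, List.map_cons, List.singleton_append,
    show k - 1 + 1 = k from by omega]
  congr 1
  apply List.map_congr_left
  intro j _
  simp only [Function.comp_apply]
  omega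

-- ---- edges and pairs decomposition ----

theorem edgesN_run_cons (t : Int × Int) (r : List (Int × Int))
    (h : r.dropWhile (fun x => x.2 == t.2) ≠ []) :
    edgesN (t :: r) =
      0 :: (edgesN (r.dropWhile (fun x => x.2 == t.2))).map
        (· + ((r.takeWhile (fun x => x.2 == t.2)).length + 1)) := by
  set tw := r.takeWhile (fun x => x.2 == t.2) with htw
  set dw := r.dropWhile (fun x => x.2 == t.2) with hdw
  set k := tw.length + 1 with hk
  have hlen : (t :: r).length = k + dw.length := by
    have hsplit : t :: r = (t :: tw) ++ dw := by simp [htw, hdw]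
    rw [hsplit, List.length_append]; simp [hk]
  unfold edgesN
  rw [breaksN_run_cons t r h, ← htw, ← hdw, ← hk]
  simp only [List.map_cons, List.map_append, List.map_nil, List.cons_append, Nat.zero_add]
  rw [hlen, Nat.add_comm k dw.length]

theorem tail_map_pairs (f : Nat → Nat) (l : List Nat) : (l.map f).tail = l.tail.map f := by
  cases l <;> simp

theorem zip_cons_zero (M : List Nat) (m : Nat) (M' : List Nat) (h : M = m :: M') :
    (0 :: M).zip M = (0, m) :: M.zip M.tail := by
  subst h; rfl

-- ---- the nil-run case of the main induction ----

theorem bN_run_nil (t : Int × Int) (r : List (Int × Int))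
    (h : r.dropWhile (fun x => x.2 == t.2) = []) (d0 : List (Int × List (Int × Int))) :
    bN (t :: r) d0 = stepB d0 (t.2, t :: r.takeWhile (fun x => x.2 == t.2)) := by
  have hr : r.takeWhile (fun x => x.2 == t.2) = r := by
    have := List.takeWhile_append_dropWhile (p := fun x => x.2 == t.2) (l := r)
    rw [h, List.append_nil] at this; exact this
  unfold bN edgesN
  rw [breaksN_run_nil t r h]
  simp only [List.nil_append]
  show List.foldl (stepN (t :: r)) d0 [(0, (t :: r).length)] = _
  simp only [List.foldl_cons, List.foldl_nil, stepN, stepB]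
  rw [nthN_zero_cons]
  rw [nthN_last]
  rw [hr]
  simp [List.getLastD_eq_getLast?]

-- ---- the cons-run case: peel the first run off bN ----

theorem bN_run_cons (t : Int × Int) (r : List (Int × Int))
    (h : r.dropWhile (fun x => x.2 == t.2) ≠ []) (d0 : List (Int × List (Int × Int))) :
    bN (t :: r) d0 =
      bN (r.dropWhile (fun x => x.2 == t.2))
        (stepB d0 (t.2, t :: r.takeWhile (fun x => x.2 == t.2))) := by
  set tw := r.takeWhile (fun x => x.2 == t.2) with htw
  set dw := r.dropWhile (fun x => x.2 == t.2) with hdw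
  set k := tw.length + 1 with hk
  have hsplit : t :: r = (t :: tw) ++ dw := by simp [htw, hdw]
  have hklen : (t :: tw).length = k := by simp [hk]
  have hshift : ∀ j, nthN (t :: r) (k + j) = nthN dw j := by
    intro j; rw [hsplit, ← hklen, nthN_append_right]
  -- edges of dw start with 0
  obtain ⟨E', hE⟩ : ∃ E', edgesN dw = 0 :: E' := ⟨_, rfl⟩
  have hM : (edgesN dw).map (· + k) = (0 + k) :: E'.map (· + k) := by
    rw [hE, List.map_cons]
  unfold bN
  rw [edgesN_run_cons t r h, ← htw, ← hdw, ← hk]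
  rw [List.tail_cons]
  rw [zip_cons_zero _ _ _ hM]
  rw [List.foldl_cons]
  -- head step produces stepB d0 (t.2, run)
  have hhead : stepN (t :: r) d0 (0, 0 + k) = stepB d0 (t.2, t :: tw) := by
    simp only [stepN, stepB, nthN_zero_cons]
    have h1 : nthN (t :: r) (0 + k - 1) = (t :: tw).getLastD (0, 0) := by
      rw [show 0 + k - 1 = (t :: tw).length - 1 by rw [hklen]; omega]
      rw [hsplit, nthN_append_left _ _ _ (by rw [hklen]; omega), nthN_last]
    rw [h1]
    rfl
  rw [hhead]
  -- remaining pairs are the dw pairs shifted by k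
  rw [tail_map_pairs]
  rw [List.zip_map]
  rw [List.foldl_map]
  apply PySem.List.foldl_congr_mem
  intro acc se hse
  have hge : 1 ≤ se.2 := by
    have h2 := (List.of_mem_zip (by rwa [show se = (se.1, se.2) from rfl] at hse)).2
    rw [show (edgesN dw).tail = breaksN dw ++ [dw.length] from rfl] at h2
    rcases List.mem_append.mp h2 with hb | hb
    · unfold breaksN at hb
      obtain ⟨j, _, hj⟩ := List.mem_map.mp hb
      omega
    · have : se.2 = dw.length := by simpa using hb
      have : 1 ≤ dw.length := List.length_pos_iff.mpr h
      omega
  show stepN (t :: r) acc (Prod.map (· + k) (· + k) se) = stepN dw acc se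
  simp only [stepN, Prod.map]
  rw [show se.1 + k = k + se.1 by omega, hshift]
  rw [show se.2 + k - 1 = k + (se.2 - 1) by omega, hshift]

-- ---- gb peels runs the same way ----

theorem gbFold_run (t : Int × Int) (r : List (Int × Int)) (d0 : List (Int × List (Int × Int))) :
    gbFold (t :: r) d0 =
      gbFold (r.dropWhile (fun x => x.2 == t.2))
        (stepB d0 (t.2, t :: r.takeWhile (fun x => x.2 == t.2))) := by
  unfold gbFold
  rw [groupRuns]
  rw [List.foldl_cons]

-- ---- main equalities ----

theorem bN_eq_gb_aux : ∀ (fuel : Nat) (ts : List (Int × Int)), ts.length ≤ fuel → ts ≠ [] →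
    ∀ d0, bN ts d0 = gbFold ts d0 := by
  intro fuel
  induction fuel with
  | zero =>
    intro ts hle hne
    cases ts with
    | nil => exact absurd rfl hne
    | cons t r => simp at hle
  | succ m ih =>
    intro ts hle hne d0
    cases ts with
    | nil => exact absurd rfl hne
    | cons t r =>
      by_cases h : r.dropWhile (fun x => x.2 == t.2) = []
      · rw [bN_run_nil t r h, gbFold_run t r d0, h]
        simp [gbFold, groupRuns]
      · rw [bN_run_cons t r h, gbFold_run t r d0]
        apply ih
        · have h1 : (r.dropWhile (fun x => x.2 == t.2)).length ≤ r.length :=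
            List.length_dropWhile_le _ _
          have h2 : (t :: r).length ≤ m + 1 := hle
          simp only [List.length_cons] at h2
          omega
        · exact h

theorem nthP_natCast (ts : List (Int × Int)) (m : Nat) : nthP ts (m : Int) = nthN ts m := by
  simp [nthP, nthN, PySem.List.pyGet?_natCast, List.getD_eq_getElem?_getD]

theorem B_eq_bN (ts : List (Int × Int)) (h : ts ≠ []) :
    get_phase_stamps_alt ts = bN ts [] := by
  have e1 : get_phase_stamps_alt ts =
      ((0 :: (((PySem.List.pyRange 1 (ts.length : Int) 1).filter
          (fun i => (nthP ts i).2 != (nthP ts (i - 1)).2)) ++ [(ts.length : Int)])).zip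
        ((((PySem.List.pyRange 1 (ts.length : Int) 1).filter
          (fun i => (nthP ts i).2 != (nthP ts (i - 1)).2)) ++ [(ts.length : Int)]))).foldl
        (fun d se => dAppend d (nthP ts se.1).2
          ((nthP ts se.1).1, (nthP ts (se.2 - 1)).1)) [] := rfl
  rw [e1]
  -- pyRange 1 n 1 over Nat length
  have hlen : (((ts.length : Int)) - 1).toNat = ts.length - 1 := by omega
  have hbr : (PySem.List.pyRange 1 (ts.length : Int) 1).filter
      (fun i => (nthP ts i).2 != (nthP ts (i - 1)).2) =
      (breaksN ts).map (fun (m : Nat) => (m : Int)) := by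
    rw [PySem.List.pyRange_one, hlen]
    simp only [List.filter_map]
    unfold breaksN
    simp only [List.map_map]
    congr 1
    · funext j
      simp only [Function.comp_apply]
      push_cast
      ring
    · congr 1
      funext j
      simp only [Function.comp_apply]
      rw [show (1 : Int) + (j : Int) = ((j + 1 : Nat) : Int) by push_cast; ring,
        show ((j + 1 : Nat) : Int) - 1 = ((j : Nat) : Int) by push_cast; ring,
        nthP_natCast, nthP_natCast]
  rw [hbr]
  -- edges as a mapped Nat list
  have hedges : (0 : Int) :: ((breaksN ts).map (fun (m : Nat) => (m : Int)) ++ [(ts.length : Int)]) =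
      (edgesN ts).map (fun (m : Nat) => (m : Int)) := by
    unfold edgesN
    rw [List.map_cons, List.map_append, List.map_cons, List.map_nil]
    norm_num
  rw [hedges]
  rw [show List.map (fun (m : Nat) => (m : Int)) (breaksN ts) ++ [(ts.length : Int)] =
      ((edgesN ts).map (fun (m : Nat) => (m : Int))).tail from by
    rw [← hedges, List.tail_cons]]
  unfold bN
  rw [show ((edgesN ts).map (fun (m : Nat) => (m : Int))).tail = (edgesN ts).tail.map (fun (m : Nat) => (m : Int))
      from by cases hx : edgesN ts <;> simp]
  rw [List.zip_map]
  rw [List.foldl_map]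
  apply PySem.List.foldl_congr_mem
  intro acc se hse
  have hge : 1 ≤ se.2 := by
    have h2 := (List.of_mem_zip (by rwa [show se = (se.1, se.2) from rfl] at hse)).2
    unfold edgesN at h2
    rw [List.tail_cons] at h2
    rcases List.mem_append.mp h2 with hb | hb
    · unfold breaksN at hb
      obtain ⟨j, _, hj⟩ := List.mem_map.mp hb
      omega
    · have h3 : se.2 = ts.length := by simpa using hb
      have h4 : ts ≠ [] := h
      have : 0 < ts.length := List.length_pos_iff.mpr h4
      omega
  show dAppend acc (nthP ts ((se.1 : Nat) : Int)).2
      ((nthP ts ((se.1 : Nat) : Int)).1, (nthP ts (((se.2 : Nat) : Int) - 1)).1) =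
      stepN ts acc se
  rw [show ((se.2 : Nat) : Int) - 1 = ((se.2 - 1 : Nat) : Int) by omega]
  rw [nthP_natCast, nthP_natCast]
  rfl

theorem bN_eq_gb (ts : List (Int × Int)) (h : ts ≠ []) :
    ∀ d0, bN ts d0 = gbFold ts d0 :=
  bN_eq_gb_aux ts.length ts le_rfl h

-- ===== VERDICT (by name: the statement is the Claim_ definition above) =====
theorem get_phase_stamps_spec : Claim_equal_get_phase_stamps := by
  intro ts _ hpre
  unfold Spec_get_phase_stamps
  cases ts with
  | nil => exact absurd rfl hpre
  | cons tm rest =>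
    rw [A_eq_gb, B_eq_bN _ (by simp), bN_eq_gb _ (by simp)]
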